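-- pv_equiv track=rewrite | github.com/oresama5656/auto_X | gui/workflow_optimizer.py | optimize_cron_for_times
-- ===== SOURCE A (Python) =====
-- from typing import List
--
-- def optimize_cron_for_times(times: List[str]) -> str:
--     """
--     投稿時刻リストから最適化されたcron式を生成（JST→UTC変換）
--
--     Args:
--         times: JST投稿時刻のリスト ["09:00", "12:00", "18:00"]
--
--     Returns:
--         UTC基準のcron式 "0 0,3,9 * * *"
--     """
--     if not times:
--         # デフォルトは毎時実行
--         return '0 * * * *'
--
--     # JST時刻をUTC時刻に変換
--     utc_hours = []
--     for time_str in times: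
--         try:
--             jst_hour = int(time_str.split(':')[0])
--             # JST → UTC 変換（JST - 9時間）
--             utc_hour = (jst_hour - 9) % 24
--             utc_hours.append(utc_hour)
--         except (ValueError, IndexError):
--             continue
--
--     if not utc_hours:
--         return '0 * * * *'
--
--     # 重複を除去してソート
--     unique_hours = sorted(set(utc_hours))
--
--     # cron式を生成
--     hours_str = ','.join(map(str, unique_hours))
--     return f'0 {hours_str} * * *'
-- ===== SOURCE B (Python) =====
-- from typing import List
--
-- def _utc_hour(time_str):
--     # UTC hour for one JST time string, or None if it does not parse
--     try:
--         return (int(time_str.split(':')[0]) - 9) % 24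
--     except (ValueError, IndexError):
--         return None
--
-- def optimize_cron_for_times(times: List[str]) -> str:
--     # Loop inversion: iterate over the 24 possible UTC hours in order and test
--     # each for membership by scanning the input; no intermediate hour list,
--     # no set, no sort.
--     if not times:
--         return '0 * * * *'
--     hours = [h for h in range(24) if any(_utc_hour(t) == h for t in times)]
--     if not hours:
--         return '0 * * * *'
--     return '0 ' + ','.join(map(str, hours)) + ' * * *'
-- ===== Notes on version B (the rewrite author's own statement) =====
-- stated objective: alternative
-- what changed: Inverts the loop structure: instead of parsing all inputs into a list and computing sorted(set(...)), B enumerates the 24 candidate UTC hours in order and keeps those for which some input time parses to that hour (an any-scan per hour), so no intermediate collection, no set and no sort exist.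
import Mathlib
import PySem

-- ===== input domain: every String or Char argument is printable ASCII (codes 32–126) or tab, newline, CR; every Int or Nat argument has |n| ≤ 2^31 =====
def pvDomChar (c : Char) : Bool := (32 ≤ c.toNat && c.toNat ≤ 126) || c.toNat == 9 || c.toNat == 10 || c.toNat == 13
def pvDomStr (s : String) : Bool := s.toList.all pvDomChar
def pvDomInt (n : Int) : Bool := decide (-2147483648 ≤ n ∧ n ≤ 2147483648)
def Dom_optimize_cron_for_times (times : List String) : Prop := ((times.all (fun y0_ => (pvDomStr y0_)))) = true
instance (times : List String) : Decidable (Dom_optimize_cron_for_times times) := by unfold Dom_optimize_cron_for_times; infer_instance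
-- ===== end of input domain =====

-- B inverts the loop: it enumerates the 24 candidate UTC hours in order and keeps those
-- some input parses to (an any-scan per hour), so no hour collection, no set and no sort.

-- shared helper: the identical parse of both Pythons
-- 'int(time_str.split(':')[0])' then '(jst_hour - 9) % 24'; none = ValueError/IndexError
def parseHour (s : String) : Option Int :=
  ((PySem.Str.split? s ":").bind (fun parts => PySem.List.pyGet? parts 0)).bind
    (fun t => (PySem.Int.ofStr? t).map (fun j => PySem.Int.mod (j - 9) 24))

-- ===== PORT A =====
def optimize_cron_for_times (times : List String) : String :=
  if times = [] then "0 * * * *"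
  else
    let utc_hours := times.foldl (fun acc s =>
      match parseHour s with
      | some h => acc ++ [h]
      | none => acc) ([] : List Int)
    if utc_hours = [] then "0 * * * *"
    else
      let unique_hours := PySem.List.sorted (PySem.Set.ofList utc_hours) (fun x => x) false
      "0 " ++ PySem.Str.join "," (unique_hours.map PySem.Int.toStr) ++ " * * *"

-- ===== PORT B =====
def optimize_cron_for_times_alt (times : List String) : String :=
  if times = [] then "0 * * * *"
  else
    -- [h for h in range(24) if any(_utc_hour(t) == h for t in times)]
    let hours := (List.range 24).filter
      (fun h => times.any (fun t => parseHour t == some (Int.ofNat h)))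
    if hours = [] then "0 * * * *"
    else
      "0 " ++ PySem.Str.join "," (hours.map (fun h : Nat => PySem.Int.toStr (Int.ofNat h))) ++ " * * *"

-- ===== PRECONDITION & SPEC =====
def Spec_optimize_cron_for_times (times : List String) (out : String) : Prop := out = optimize_cron_for_times_alt times
instance (times : List String) (out : String) : Decidable (Spec_optimize_cron_for_times times out) := by unfold Spec_optimize_cron_for_times; infer_instance

-- ===== CLAIM =====
def Claim_equal_optimize_cron_for_times : Prop := ∀ (times : List String), Dom_optimize_cron_for_times times → Spec_optimize_cron_for_times times (optimize_cron_for_times times)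

-- ===== LEMMAS AND PROOFS =====

lemma parseHour_bound {s : String} {h : Int} (hp : parseHour s = some h) : 0 ≤ h ∧ h < 24 := by
  simp only [parseHour, Option.bind_eq_some_iff, Option.map_eq_some_iff] at hp
  obtain ⟨_, _, _, j, _, rfl⟩ := hp
  exact ⟨PySem.Int.mod_nonneg _ (by norm_num), PySem.Int.mod_lt _ (by norm_num)⟩

-- membership in A's accumulated hour list = some input parses to that hour
lemma mem_fold (times : List String) (acc : List Int) (h : Int) :
    h ∈ times.foldl (fun acc s => match parseHour s with | some x => acc ++ [x] | none => acc) acc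
      ↔ h ∈ acc ∨ ∃ s ∈ times, parseHour s = some h := by
  induction times generalizing acc with
  | nil => simp
  | cons t rest ih =>
    simp only [List.foldl_cons, ih, List.mem_cons]
    rcases e : parseHour t with _ | x
    · constructor
      · rintro (ha | ⟨s, hs, hp⟩)
        · exact Or.inl ha
        · exact Or.inr ⟨s, Or.inr hs, hp⟩
      · rintro (ha | ⟨s, (rfl | hs), hp⟩)
        · exact Or.inl ha
        · rw [e] at hp; cases hp
        · exact Or.inr ⟨s, hs, hp⟩
    · constructor
      · rintro (ha | ⟨s, hs, hp⟩)
        · rcases List.mem_append.1 ha with ha | ha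
          · exact Or.inl ha
          · simp at ha; subst ha; exact Or.inr ⟨t, Or.inl rfl, e⟩
        · exact Or.inr ⟨s, Or.inr hs, hp⟩
      · rintro (ha | ⟨s, (rfl | hs), hp⟩)
        · exact Or.inl (List.mem_append.2 (Or.inl ha))
        · rw [e] at hp; injection hp with hp; subst hp
          exact Or.inl (List.mem_append.2 (Or.inr (by simp)))
        · exact Or.inr ⟨s, hs, hp⟩

lemma sorted_set_eq_bucket (utc : List Int) (hb : ∀ h ∈ utc, 0 ≤ h ∧ h < 24) :
    PySem.List.sorted (PySem.Set.ofList utc) (fun x => x) false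
      = ((List.range 24).filter (fun k : Nat => decide ((k : Int) ∈ utc))).map Int.ofNat := by
  apply PySem.List.sorted_id_eq_of_perm_of_pairwise
  · apply (List.perm_ext_iff_of_nodup ?_ (PySem.Set.nodup_ofList utc)).2
    · intro x
      simp only [List.mem_map, List.mem_filter, List.mem_range, PySem.Set.mem_ofList,
        decide_eq_true_eq]
      constructor
      · rintro ⟨k, ⟨_, hmem⟩, rfl⟩; exact hmem
      · intro hx
        obtain ⟨h0, h24⟩ := hb x hx
        refine ⟨x.toNat, ⟨by omega, by rwa [Int.toNat_of_nonneg h0]⟩, ?_⟩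
        exact_mod_cast Int.toNat_of_nonneg h0
    · refine (List.Nodup.filter _ (List.nodup_range)).map ?_
      intro a b hab; exact Int.ofNat.inj hab
  · refine List.Pairwise.map _ ?_ ((List.pairwise_lt_range).filter _)
    intro a b hab; exact Int.ofNat_le.2 hab.le

-- ===== VERDICT =====
theorem optimize_cron_for_times_spec : Claim_equal_optimize_cron_for_times := by
  intro times _
  unfold Spec_optimize_cron_for_times optimize_cron_for_times optimize_cron_for_times_alt
  by_cases hnil : times = []
  · simp [hnil]
  · simp only [hnil, if_false]
    set utc := times.foldl (fun acc s => match parseHour s with | some h => acc ++ [h] | none => acc) ([] : List Int) with hutc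
    have hb : ∀ h ∈ utc, 0 ≤ h ∧ h < 24 := by
      intro h hh
      rcases (mem_fold times [] h).1 hh with h' | ⟨s, _, hp⟩
      · cases h'
      · exact parseHour_bound hp
    have hpred : ∀ k ∈ List.range 24,
        (times.any (fun t => parseHour t == some (Int.ofNat k)))
          = decide ((k : Int) ∈ utc) := by
      intro k _
      rw [Bool.eq_iff_iff, List.any_eq_true, decide_eq_true_iff, hutc, mem_fold]
      simp [beq_iff_eq]
    have hfilter : (List.range 24).filter (fun h => times.any (fun t => parseHour t == some (Int.ofNat h)))
        = (List.range 24).filter (fun k : Nat => decide ((k : Int) ∈ utc)) :=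
      List.filter_congr (fun k hk => by rw [hpred k hk])
    by_cases hempty : utc = []
    · have hnone : ∀ s ∈ times, parseHour s = none := by
        intro s hs
        rcases e : parseHour s with _ | x
        · rfl
        · exfalso
          have : x ∈ utc := (mem_fold times [] x).2 (Or.inr ⟨s, hs, e⟩)
          simp [hempty] at this
      have : (List.range 24).filter (fun h => times.any (fun t => parseHour t == some (Int.ofNat h))) = [] := by
        apply List.filter_eq_nil_iff.2
        intro k _
        simp only [List.any_eq_true, beq_iff_eq, not_exists]
        rintro s ⟨hs, hp⟩
        rw [hnone s hs] at hp; cases hp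
      rw [if_pos hempty, if_pos this]
    · have hne : (List.range 24).filter (fun h => times.any (fun t => parseHour t == some (Int.ofNat h))) ≠ [] := by
        rw [hfilter]
        obtain ⟨h, hh⟩ := List.exists_mem_of_ne_nil utc hempty
        obtain ⟨h0, h24⟩ := hb h hh
        intro hc
        have : h.toNat ∈ (List.range 24).filter (fun k : Nat => decide ((k : Int) ∈ utc)) := by
          simp only [List.mem_filter, List.mem_range, decide_eq_true_eq]
          exact ⟨by omega, by rwa [Int.toNat_of_nonneg h0]⟩
        rw [hc] at this; cases this
      simp only [hempty, if_false, hne, if_false]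
      rw [hfilter, sorted_set_eq_bucket utc hb, List.map_map]
      rfl
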